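-- pv_equiv track=rewrite | github.com/AIResearchNest/mad | mad/optimize/_maheen_optimize.py | maheen_agent_goal
-- ===== SOURCE A (Python) =====
-- from typing import Dict, List, Tuple
--
-- def maheen_agent_goal(a: Dict[str, int], resources: Dict[str, int]) -> str:
--     """
--     Decides which agent will conduct the current goal based on the agent's current available resources.
--
--     Parameters
--     ----------
--     a : Dict[str, int]
--         Dictionary containing the cost values for each agent.
--     resources : Dict[str, int]
--         Dictionary containing the available resources for each agent.
--
--     Returns
--     -------
--     name: str
--         Name of the agent assigned to each node.
--     """
--     agents = ["grace", "remus", "franklin"]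
--
--     # Assign the first three agents to the first three nodes
--     if len(a) <= 3:
--         agent_assigned = agents[len(a) - 1]
--         resources[agent_assigned] -= a[agent_assigned]
--         return agent_assigned
--
--     # Calculate the cost difference for each agent
--     cost_diff = {agent: resources[agent] - a[agent] for agent in agents}
--
--     # Sort the agents based on the cost difference in ascending order
--     sorted_agents = sorted(cost_diff, key=lambda agent: cost_diff[agent])
--
--     # Find the first agent with a non-negative cost difference
--     for agent in sorted_agents:
--         if cost_diff[agent] >= 0:
--             agent_assigned = agent
--             resources[agent_assigned] -= a[agent_assigned]
--             return agent_assigned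
--
--     # If no agent has a non-negative cost difference, choose the agent with the smallest negative cost difference
--     agent_assigned = sorted_agents[0]
--     resources[agent_assigned] -= a[agent_assigned]
--     return agent_assigned
-- ===== SOURCE B (Python) =====
-- def maheen_agent_goal(a, resources):
--     agents = ["grace", "remus", "franklin"]
--     if len(a) <= 3:
--         chosen = agents[len(a) - 1]
--     else:
--         # one pass: track the overall-minimum agent and the minimum among
--         # non-negative cost differences simultaneously (first wins on ties)
--         best = None      # (agent, diff) with smallest diff seen so far
--         best_nn = None   # same, restricted to diff >= 0
--         for agent in agents:
--             d = resources[agent] - a[agent]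
--             if best is None or d < best[1]:
--                 best = (agent, d)
--             if d >= 0 and (best_nn is None or d < best_nn[1]):
--                 best_nn = (agent, d)
--         chosen = (best_nn or best)[0]
--     resources[chosen] -= a[chosen]
--     return chosen
-- ===== Notes on version B (the rewrite author's own statement) =====
-- stated objective: alternative
-- what changed: In the >3-agents branch B replaces A's build-a-cost_diff-dict, full stable sort and scan-for-first-non-negative with a single pass over the agents maintaining two accumulators (overall minimum and minimum among non-negative cost differences) and picking the non-negative one when it exists.
import Mathlib
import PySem

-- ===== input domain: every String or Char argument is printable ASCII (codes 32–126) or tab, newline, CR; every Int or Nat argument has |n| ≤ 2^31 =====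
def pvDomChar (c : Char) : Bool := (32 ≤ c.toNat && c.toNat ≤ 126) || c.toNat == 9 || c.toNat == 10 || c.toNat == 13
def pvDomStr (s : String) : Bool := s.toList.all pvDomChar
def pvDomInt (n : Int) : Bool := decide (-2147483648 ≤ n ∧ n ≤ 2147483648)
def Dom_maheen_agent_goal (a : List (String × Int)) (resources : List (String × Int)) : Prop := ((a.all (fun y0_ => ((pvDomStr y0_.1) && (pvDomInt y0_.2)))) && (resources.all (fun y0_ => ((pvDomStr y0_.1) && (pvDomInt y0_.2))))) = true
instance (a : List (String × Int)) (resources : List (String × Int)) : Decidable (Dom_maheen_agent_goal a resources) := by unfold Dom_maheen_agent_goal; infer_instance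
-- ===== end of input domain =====

-- B replaces A's sort-then-scan with a single pass keeping two running minima; equivalence is
-- about the RETURN value (both Pythons also perform the same in-place update resources[chosen] -= a[chosen]).

-- ===== PORT A =====
-- A: pick agents[len(a)-1] when len(a) <= 3; else sort agents by cost_diff ascending and
-- return the first with non-negative cost_diff, falling back to sorted_agents[0].
def maheen_agent_goal (a : List (String × Int)) (resources : List (String × Int)) : String :=
  let agents : List String := ["grace", "remus", "franklin"]
  let da := PySem.Dict.ofList a
  if da.size ≤ 3 then
    -- agents[len(a) - 1]; for len(a) = 0 Python's negative index -1 picks "franklin"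
    PySem.List.pyGetD agents ((da.size : Int) - 1) ""
  else
    let dr := PySem.Dict.ofList resources
    -- {agent: resources[agent] - a[agent] for agent in agents}  (Pre_ guarantees the lookups hit)
    let cost_diff := agents.foldl (fun d ag => d.insert ag (dr.getD ag 0 - da.getD ag 0)) PySem.Dict.empty
    let sorted_agents := PySem.List.sorted cost_diff.keys (fun ag => cost_diff.getD ag 0) false
    match sorted_agents.find? (fun ag => decide (0 ≤ cost_diff.getD ag 0)) with
    | some ag => ag
    | none => PySem.List.pyGetD sorted_agents 0 ""

-- ===== PORT B =====
-- B: same guard; else a single fold over the agents carrying (best, best_nn): the first agent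
-- of overall minimal cost difference and the first of minimal non-negative cost difference.
def maheen_agent_goal_alt (a : List (String × Int)) (resources : List (String × Int)) : String :=
  let agents : List String := ["grace", "remus", "franklin"]
  let da := PySem.Dict.ofList a
  if da.size ≤ 3 then
    PySem.List.pyGetD agents ((da.size : Int) - 1) ""
  else
    let dr := PySem.Dict.ofList resources
    let step : (Option (String × Int) × Option (String × Int)) → String →
        (Option (String × Int) × Option (String × Int)) := fun st ag =>
      let d := dr.getD ag 0 - da.getD ag 0
      let best := match st.1 with
        | none => some (ag, d)
        | some b => if d < b.2 then some (ag, d) else some b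
      let bestNN :=
        if 0 ≤ d then
          match st.2 with
          | none => some (ag, d)
          | some b => if d < b.2 then some (ag, d) else some b
        else st.2
      (best, bestNN)
    match agents.foldl step (none, none) with
    | (_, some b) => b.1
    | (some b, none) => b.1
    | (none, none) => ""

-- ===== PRECONDITION & SPEC =====
-- Pre_ excludes exactly the inputs on which A raises KeyError: the chosen agent (small branch)
-- or one of the three fixed agents (large branch) is missing from a or from resources.
def Pre_maheen_agent_goal (a : List (String × Int)) (resources : List (String × Int)) : Prop :=
  let da := PySem.Dict.ofList a
  let dr := PySem.Dict.ofList resources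
  if da.size ≤ 3 then
    let ch := PySem.List.pyGetD ["grace", "remus", "franklin"] ((da.size : Int) - 1) ""
    da.contains ch = true ∧ dr.contains ch = true
  else
    ∀ ag ∈ (["grace", "remus", "franklin"] : List String), da.contains ag = true ∧ dr.contains ag = true
instance (a : List (String × Int)) (resources : List (String × Int)) : Decidable (Pre_maheen_agent_goal a resources) := by unfold Pre_maheen_agent_goal; infer_instance

def pvWitness_maheen_agent_goal : (List (String × Int)) × (List (String × Int)) := ([("grace", 1)], [("grace", 5)])

def Spec_maheen_agent_goal (a : List (String × Int)) (resources : List (String × Int)) (out : String) : Prop := out = maheen_agent_goal_alt a resources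
instance (a : List (String × Int)) (resources : List (String × Int)) (out : String) : Decidable (Spec_maheen_agent_goal a resources out) := by unfold Spec_maheen_agent_goal; infer_instance

-- ===== CLAIM (what is proved, stated in full; the proofs are below) =====
def Claim_equal_maheen_agent_goal : Prop := ∀ (a : List (String × Int)) (resources : List (String × Int)), Dom_maheen_agent_goal a resources → Pre_maheen_agent_goal a resources → Spec_maheen_agent_goal a resources (maheen_agent_goal a resources)

-- ===== LEMMAS AND PROOFS =====

-- The selection core on the fixed three-agent list, for an arbitrary cost function cd:
-- A's "first non-negative in ascending stable sort, else sorted head" equals B's single-pass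
-- double-minimum fold.
set_option maxHeartbeats 2000000 in
lemma select3_eq (cd : String → Int) :
    (match (PySem.List.sorted ["grace", "remus", "franklin"] cd false).find?
        (fun ag => decide (0 ≤ cd ag)) with
      | some ag => ag
      | none => PySem.List.pyGetD (PySem.List.sorted ["grace", "remus", "franklin"] cd false) 0 "")
    = (match (["grace", "remus", "franklin"] : List String).foldl
          (fun (st : Option (String × Int) × Option (String × Int)) ag =>
            let d := cd ag
            let best := match st.1 with
              | none => some (ag, d)
              | some b => if d < b.2 then some (ag, d) else some b
            let bestNN :=
              if 0 ≤ d then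
                match st.2 with
                | none => some (ag, d)
                | some b => if d < b.2 then some (ag, d) else some b
              else st.2
            (best, bestNN)) (none, none) with
        | (_, some b) => b.1
        | (some b, none) => b.1
        | (none, none) => "") := by
  by_cases h1 : (0 ≤ cd "grace") <;> by_cases h2 : (0 ≤ cd "remus") <;>
    by_cases h3 : (0 ≤ cd "franklin") <;> by_cases h4 : (cd "remus" < cd "grace") <;>
    by_cases h5 : (cd "franklin" < cd "grace") <;> by_cases h6 : (cd "franklin" < cd "remus") <;>
    simp [*, PySem.List.sorted, PySem.List.insertBy, PySem.List.pyGetD,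
      PySem.List.pyGet?, PySem.List.pyIdx?, List.foldl] <;>
    omega

-- ===== VERDICT (by name: the statement is the Claim_ definition above) =====
theorem maheen_agent_goal_spec : Claim_equal_maheen_agent_goal := by
  intro a resources _hdom _hpre
  unfold Spec_maheen_agent_goal maheen_agent_goal maheen_agent_goal_alt
  by_cases h : (PySem.Dict.ofList a).size ≤ 3
  · simp only [h, if_true]
  · simp only [h, if_false]
    exact select3_eq _
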